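-- pv_equiv track=rewrite | github.com/buddyh/newsroom | newsroom/audio.py | _split_sentences
-- ===== SOURCE A (Python) =====
-- def _split_sentences(text: str) -> list[str]:
--     """Split text into sentence-like chunks preserving delimiters."""
--     parts: list[str] = []
--     current = ""
--     for char in text:
--         current += char
--         if char in ".!?" and len(current) > 1:
--             parts.append(current)
--             current = ""
--     if current:
--         parts.append(current)
--     return parts
-- ===== SOURCE B (Python) =====
-- def _split_sentences(text: str) -> list[str]:
--     """Split text into sentence-like chunks preserving delimiters."""
--     chunks = []
--     i, n = 0, len(text)
--     while i < n:
--         # each chunk: one leading char, then up to (and including) the next delimiter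
--         j = i + 1
--         while j < n and text[j] not in ".!?":
--             j += 1
--         if j < n:
--             j += 1
--         chunks.append(text[i:j])
--         i = j
--     return chunks
-- ===== Notes on version B (the rewrite author's own statement) =====
-- stated objective: alternative
-- what changed: Replaces the per-character string accumulation (current += char with a split-on-delimiter guard) by index-based scanning: each chunk is taken as a slice from one leading character up to and including the next delimiter, so no growing accumulator string is maintained.
import Mathlib
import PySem

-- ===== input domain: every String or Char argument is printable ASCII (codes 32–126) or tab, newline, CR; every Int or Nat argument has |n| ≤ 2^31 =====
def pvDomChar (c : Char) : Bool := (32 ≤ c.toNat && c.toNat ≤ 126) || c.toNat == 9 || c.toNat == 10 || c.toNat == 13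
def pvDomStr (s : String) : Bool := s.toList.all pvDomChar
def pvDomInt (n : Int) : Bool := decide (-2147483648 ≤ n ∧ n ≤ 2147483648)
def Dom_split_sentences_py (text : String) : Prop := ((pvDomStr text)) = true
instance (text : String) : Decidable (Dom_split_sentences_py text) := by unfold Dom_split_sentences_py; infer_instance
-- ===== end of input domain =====

-- B replaces A's per-character accumulator loop by slicing each chunk out directly
-- (one leading char, then everything up to and including the next delimiter).

-- ===== PORT A =====
-- literal port of A's for-loop: state = (parts, current); 'char in ".!?"' = the disjunction
def split_sentences_py (text : String) : List String :=
  let st := text.toList.foldl (fun (st : List String × List Char) (c : Char) =>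
      let current := st.2 ++ [c]
      if (c = '.' ∨ c = '!' ∨ c = '?') ∧ current.length > 1 then
        (st.1 ++ [String.mk current], ([] : List Char))
      else (st.1, current)) ([], [])
  if st.2.isEmpty then st.1 else st.1 ++ [String.mk st.2]

-- ===== PORT B =====
def pvIsDelim (c : Char) : Bool := c = '.' ∨ c = '!' ∨ c = '?'

-- B's outer while-loop as recursion on the remaining characters; the inner j-scan and the
-- slice text[i:j] become takeWhile/dropWhile of the non-delimiter prefix after the lead char.
def split_sentences_py_alt_core : List Char → List String
  | [] => []
  | c :: rest =>
    let body := rest.takeWhile (fun x => !pvIsDelim x)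
    match h : rest.dropWhile (fun x => !pvIsDelim x) with
    | d :: rest' => String.mk (c :: (body ++ [d])) :: split_sentences_py_alt_core rest'
    | [] => [String.mk (c :: body)]
  termination_by cs => cs.length
  decreasing_by
    have := List.length_dropWhile_le (p := fun x => !pvIsDelim x) (l := rest)
    simp only [h, List.length_cons] at this
    simp; omega

def split_sentences_py_alt (text : String) : List String :=
  split_sentences_py_alt_core text.toList

-- ===== PRECONDITION & SPEC =====
def Spec_split_sentences_py (text : String) (out : List String) : Prop := out = split_sentences_py_alt text
instance (text : String) (out : List String) : Decidable (Spec_split_sentences_py text out) := by unfold Spec_split_sentences_py; infer_instance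

-- ===== CLAIM (what is proved, stated in full; the proofs are below) =====
def Claim_equal_split_sentences_py : Prop := ∀ (text : String), Dom_split_sentences_py text → Spec_split_sentences_py text (split_sentences_py text)

-- ===== LEMMAS AND PROOFS =====

-- A's loop in continuation form: chunks still to be produced given accumulator cur and input cs
def pvLoopA (cur : List Char) : List Char → List String
  | [] => if cur.isEmpty then [] else [String.mk cur]
  | c :: cs =>
    let current := cur ++ [c]
    if (c = '.' ∨ c = '!' ∨ c = '?') ∧ current.length > 1 then
      String.mk current :: pvLoopA [] cs
    else pvLoopA current cs

theorem pvFoldA_eq (cs : List Char) : ∀ (parts : List String) (cur : List Char),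
    (let st := cs.foldl (fun (st : List String × List Char) (c : Char) =>
        let current := st.2 ++ [c]
        if (c = '.' ∨ c = '!' ∨ c = '?') ∧ current.length > 1 then
          (st.1 ++ [String.mk current], ([] : List Char))
        else (st.1, current)) (parts, cur)
     if st.2.isEmpty then st.1 else st.1 ++ [String.mk st.2]) = parts ++ pvLoopA cur cs := by
  induction cs with
  | nil => intro parts cur; cases cur <;> simp [pvLoopA]
  | cons c cs ih =>
    intro parts cur
    simp only [List.foldl_cons, pvLoopA]
    by_cases hc : (c = '.' ∨ c = '!' ∨ c = '?') ∧ (cur ++ [c]).length > 1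
    · simp only [hc, if_pos]
      rw [ih]
      simp
    · simp only [hc, if_neg, not_false_iff]
      rw [ih]

theorem pvTakeWhile_all_append {p : Char → Bool} {l t : List Char} {c : Char}
    (hl : ∀ x ∈ l, p x = true) (hc : p c = false) :
    (l ++ c :: t).takeWhile p = l := by
  induction l with
  | nil => simp [List.takeWhile_cons, hc]
  | cons a l ih =>
    simp only [List.cons_append, List.takeWhile_cons, hl a (by simp)]
    simp [ih (fun x hx => hl x (by simp [hx]))]

theorem pvDropWhile_all_append {p : Char → Bool} {l t : List Char} {c : Char}
    (hl : ∀ x ∈ l, p x = true) (hc : p c = false) :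
    (l ++ c :: t).dropWhile p = c :: t := by
  induction l with
  | nil => simp [List.dropWhile_cons, hc]
  | cons a l ih =>
    simp only [List.cons_append, List.dropWhile_cons, hl a (by simp)]
    simp [ih (fun x hx => hl x (by simp [hx]))]

theorem pvLoopA_eq_core (cs : List Char) : ∀ (cur : List Char),
    (∀ x ∈ cur.tail, pvIsDelim x = false) →
    pvLoopA cur cs = split_sentences_py_alt_core (cur ++ cs) := by
  induction cs with
  | nil =>
    intro cur hcur
    cases cur with
    | nil => simp [pvLoopA, split_sentences_py_alt_core]
    | cons c0 rest =>
      have h1 : rest.takeWhile (fun x => !pvIsDelim x) = rest :=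
        List.takeWhile_eq_self_iff.mpr (fun x hx => by simp [hcur x hx])
      have h2 : rest.dropWhile (fun x => !pvIsDelim x) = [] :=
        List.dropWhile_eq_nil_iff.mpr (fun x hx => by simp [hcur x hx])
      have hL : pvLoopA (c0 :: rest) [] = [String.mk (c0 :: rest)] := by simp [pvLoopA]
      rw [hL, List.append_nil, split_sentences_py_alt_core]
      simp only [h1]
      split
      · rename_i heq; rw [h2] at heq; cases heq
      · rfl
  | cons c cs ih =>
    intro cur hcur
    cases cur with
    | nil =>
      have : pvLoopA [] (c :: cs) = pvLoopA [c] cs := by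
        simp [pvLoopA]
      rw [this, ih [c] (by simp)]
      simp
    | cons c0 rest =>
      by_cases hd : pvIsDelim c = true
      · have hcond : (c = '.' ∨ c = '!' ∨ c = '?') ∧ ((c0 :: rest) ++ [c]).length > 1 := by
          constructor
          · simpa [pvIsDelim] using hd
          · simp
        have h1 := pvTakeWhile_all_append (p := fun x => !pvIsDelim x) (l := rest) (t := cs) (c := c)
          (hl := fun x hx => by simp [hcur x hx]) (hc := by simp [hd])
        have h2 := pvDropWhile_all_append (p := fun x => !pvIsDelim x) (l := rest) (t := cs) (c := c)
          (hl := fun x hx => by simp [hcur x hx]) (hc := by simp [hd])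
        rw [show (c0 :: rest) ++ c :: cs = c0 :: (rest ++ c :: cs) by simp]
        rw [split_sentences_py_alt_core]
        simp only [h1]
        simp only [pvLoopA, if_pos hcond]
        rw [ih [] (by simp)]
        simp only [List.nil_append]
        split
        · rename_i heq; rw [h2] at heq; cases heq; rfl
        · rename_i heq; rw [h2] at heq; cases heq
      · have hcond : ¬ ((c = '.' ∨ c = '!' ∨ c = '?') ∧ ((c0 :: rest) ++ [c]).length > 1) := by
          intro ⟨h, _⟩
          exact hd (by simpa [pvIsDelim] using h)
        simp only [pvLoopA, if_neg hcond]
        have htail : ∀ x ∈ ((c0 :: rest) ++ [c]).tail, pvIsDelim x = false := by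
          intro x hx
          have hx' : x ∈ rest ++ [c] := by simpa using hx
          rcases List.mem_append.mp hx' with hx2 | hx2
          · exact hcur x hx2
          · have hxc : x = c := by simpa using hx2
            subst hxc; simpa using hd
        have := ih ((c0 :: rest) ++ [c]) (by simpa using htail)
        rw [this]
        simp

-- ===== VERDICT (by name: the statement is the Claim_ definition above) =====
theorem split_sentences_py_spec : Claim_equal_split_sentences_py := by
  intro text _
  unfold Spec_split_sentences_py split_sentences_py split_sentences_py_alt
  rw [pvFoldA_eq text.toList [] []]
  rw [pvLoopA_eq_core text.toList [] (by simp)]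
  simp
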